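-- pv_equiv track=rewrite | github.com/TranKimNhat/VPP-in-Ancillary-market | src/env/IEEE123bus.py | _normalize_equals
-- ===== SOURCE A (Python) =====
-- def _normalize_equals(text: str) -> str:
--     output = []
--     in_quote = False
--     quote_char = ""
--     depth = 0
--     skip_spaces = False
--
--     for ch in text:
--         if skip_spaces and ch.isspace():
--             continue
--         skip_spaces = False
--
--         if ch in ('"', "'"):
--             if in_quote and ch == quote_char:
--                 in_quote = False
--             elif not in_quote:
--                 in_quote = True
--                 quote_char = ch
--
--         if not in_quote:
--             if ch in "[(":
--                 depth += 1
--             elif ch in "])":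
--                 depth = max(depth - 1, 0)
--             if ch == "=" and depth == 0:
--                 while output and output[-1].isspace():
--                     output.pop()
--                 output.append("=")
--                 skip_spaces = True
--                 continue
--
--         output.append(ch)
--
--     return "".join(output)
-- ===== SOURCE B (Python) =====
-- def _normalize_equals(text: str) -> str:
--     # Split into the segments between top-level '=' signs, then join with '='
--     # trimming whitespace only at the join boundaries.
--     segments = []
--     cur = []
--     in_quote = False
--     quote_char = ""
--     depth = 0
--     for ch in text:
--         if ch in ('"', "'"):
--             if in_quote and ch == quote_char:
--                 in_quote = False
--             elif not in_quote:
--                 in_quote = True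
--                 quote_char = ch
--         if not in_quote:
--             if ch in "[(":
--                 depth += 1
--             elif ch in "])":
--                 depth = max(depth - 1, 0)
--             if ch == "=" and depth == 0:
--                 segments.append("".join(cur))
--                 cur = []
--                 continue
--         cur.append(ch)
--     segments.append("".join(cur))
--     if len(segments) == 1:
--         return segments[0]
--     parts = [segments[0].rstrip()]
--     parts.extend(s.strip() for s in segments[1:-1])
--     parts.append(segments[-1].lstrip())
--     return "=".join(parts)
-- ===== Notes on version B (the rewrite author's own statement) =====
-- stated objective: simpler
-- what changed: A interleaves output construction with retroactive pops and a skip-spaces flag in one stateful pass; B first splits the text into segments at top-level '=' signs (same quote/bracket state machine) and then joins them with '=', stripping whitespace only at the join boundaries.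
import Mathlib
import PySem

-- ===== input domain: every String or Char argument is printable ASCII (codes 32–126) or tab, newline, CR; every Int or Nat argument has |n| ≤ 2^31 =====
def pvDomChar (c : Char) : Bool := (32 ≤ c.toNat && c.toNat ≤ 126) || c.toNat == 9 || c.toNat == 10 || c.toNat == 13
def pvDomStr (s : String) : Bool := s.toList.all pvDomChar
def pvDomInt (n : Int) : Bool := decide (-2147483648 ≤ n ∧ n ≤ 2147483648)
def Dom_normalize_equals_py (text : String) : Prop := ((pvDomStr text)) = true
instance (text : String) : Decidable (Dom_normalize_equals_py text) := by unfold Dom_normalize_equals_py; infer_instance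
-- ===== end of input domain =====

-- B re-decomposes A's single stateful pass into split-at-top-level-'=' segments
-- plus a join that strips only at the boundaries (objective: simpler); same return value.

-- Shared helpers: the quote/bracket state machine lines that appear verbatim in BOTH
-- Python versions (A and B use the exact same update rules).
def quoteStep (in_quote : Bool) (quote_char ch : Char) : Bool × Char :=
  if ch = '"' ∨ ch = '\'' then
    if in_quote && (ch == quote_char) then (false, quote_char)
    else if !in_quote then (true, ch)
    else (in_quote, quote_char)
  else (in_quote, quote_char)

def bracketStep (depth : Int) (ch : Char) : Int :=
  if ch = '[' ∨ ch = '(' then depth + 1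
  else if ch = ']' ∨ ch = ')' then max (depth - 1) 0
  else depth

-- ===== PORT A =====
-- Loop over the characters; state = (output, in_quote, quote_char, depth, skip_spaces).
-- Python's initial quote_char is "" and is only read while in_quote, so the Char
-- sentinel ' ' (which can never open a quote) is exact.
-- The 'while output and output[-1].isspace(): output.pop()' loop removes exactly the
-- trailing whitespace of output, i.e. PySem.Chars.rstrip (exact).
def normA : List Char → List Char → Bool → Char → Int → Bool → List Char
  | [], output, _, _, _, _ => output
  | ch :: rest, output, in_quote, quote_char, depth, skip_spaces =>
    if skip_spaces && PySem.Chars.isspace ch then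
      normA rest output in_quote quote_char depth skip_spaces
    else
      let st := quoteStep in_quote quote_char ch
      if !st.1 then
        let depth' := bracketStep depth ch
        if ch = '=' ∧ depth' = 0 then
          normA rest (PySem.Chars.rstrip output ++ ['=']) st.1 st.2 depth' true
        else
          normA rest (output ++ [ch]) st.1 st.2 depth' false
      else
        normA rest (output ++ [ch]) st.1 st.2 depth false

def normalize_equals_py (text : String) : String :=
  String.mk (normA text.toList [] false ' ' 0 false)

-- ===== PORT B =====
-- First pass: cut the text at top-level '=' into segments (same state machine).
def normB : List Char → List (List Char) → List Char → Bool → Char → Int → List (List Char)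
  | [], segments, cur, _, _, _ => segments ++ [cur]
  | ch :: rest, segments, cur, in_quote, quote_char, depth =>
    let st := quoteStep in_quote quote_char ch
    if !st.1 then
      let depth' := bracketStep depth ch
      if ch = '=' ∧ depth' = 0 then
        normB rest (segments ++ [cur]) [] st.1 st.2 depth'
      else
        normB rest segments (cur ++ [ch]) st.1 st.2 depth'
    else
      normB rest segments (cur ++ [ch]) st.1 st.2 depth

-- Second step: join with '=', trimming only at the join boundaries
-- (first segment rstrip, interior strip, last lstrip; a lone segment is returned as-is).
def renderTail : List (List Char) → List Char
  | [] => []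
  | [s] => PySem.Chars.lstrip s
  | s :: rest => PySem.Chars.strip s ++ '=' :: renderTail rest

def renderSegs : List (List Char) → List Char
  | [] => []
  | [s] => s
  | s :: rest => PySem.Chars.rstrip s ++ '=' :: renderTail rest

def normalize_equals_py_alt (text : String) : String :=
  String.mk (renderSegs (normB text.toList [] [] false ' ' 0))

-- ===== PRECONDITION & SPEC =====
def Spec_normalize_equals_py (text : String) (out : String) : Prop := out = normalize_equals_py_alt text
instance (text : String) (out : String) : Decidable (Spec_normalize_equals_py text out) := by unfold Spec_normalize_equals_py; infer_instance

-- ===== CLAIM (what is proved, stated in full; the proofs are below) =====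
def Claim_equal_normalize_equals_py : Prop := ∀ (text : String), Dom_normalize_equals_py text → Spec_normalize_equals_py text (normalize_equals_py text)

-- ===== LEMMAS AND PROOFS =====

-- "A's partial output" as a function of B's partial state: completed segments rendered
-- (first rstripped, interiors stripped) and the lstrip of the current segment pending.
def renderTailP : List (List Char) → List Char → List Char
  | [], cur => PySem.Chars.lstrip cur
  | s :: rest, cur => PySem.Chars.strip s ++ '=' :: renderTailP rest cur

def renderP : List (List Char) → List Char → List Char
  | [], cur => cur
  | s :: rest, cur => PySem.Chars.rstrip s ++ '=' :: renderTailP rest cur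

lemma renderTail_cons (s : List Char) (t : List (List Char)) (h : t ≠ []) :
    renderTail (s :: t) = PySem.Chars.strip s ++ '=' :: renderTail t := by
  cases t with
  | nil => exact absurd rfl h
  | cons a t => simp [renderTail]

lemma renderTail_eq (rest : List (List Char)) (cur : List Char) :
    renderTail (rest ++ [cur]) = renderTailP rest cur := by
  induction rest with
  | nil => simp [renderTail, renderTailP]
  | cons s rest ih =>
      rw [List.cons_append, renderTail_cons s (rest ++ [cur]) (by simp)]
      simp [renderTailP, ih]

lemma renderSegs_eq (segs : List (List Char)) (cur : List Char) :
    renderSegs (segs ++ [cur]) = renderP segs cur := by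
  cases segs with
  | nil => simp [renderSegs, renderP]
  | cons s rest =>
      have h : renderSegs (s :: (rest ++ [cur]))
          = PySem.Chars.rstrip s ++ '=' :: renderTail (rest ++ [cur]) := by
        cases hr : rest ++ [cur] with
        | nil => simp at hr
        | cons a t => simp [renderSegs]
      rw [List.cons_append, h, renderTail_eq]
      rfl

lemma lstrip_allspace (cur : List Char) (h : cur.all PySem.Chars.isspace = true) :
    PySem.Chars.lstrip cur = [] := by
  simp only [PySem.Chars.lstrip]
  simp only [List.all_eq_true] at h
  induction cur with
  | nil => rfl
  | cons c cur ih =>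
      rw [List.dropWhile_cons]
      simp [h c (by simp), ih (fun x hx => h x (by simp [hx]))]

lemma lstrip_append (cur : List Char) (ch : Char)
    (h : cur.all PySem.Chars.isspace = false ∨ PySem.Chars.isspace ch = false) :
    PySem.Chars.lstrip (cur ++ [ch]) = PySem.Chars.lstrip cur ++ [ch] := by
  simp only [PySem.Chars.lstrip]
  induction cur with
  | nil =>
      have : PySem.Chars.isspace ch = false := by simpa using h
      simp [List.dropWhile_cons, this]
  | cons c cur ih =>
      by_cases hc : PySem.Chars.isspace c = true
      · have h' : cur.all PySem.Chars.isspace = false ∨ PySem.Chars.isspace ch = false := by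
          rcases h with h | h
          · simp [List.all_cons, hc] at h; simp [h]
          · exact Or.inr h
        simp [List.dropWhile_cons, hc, ih h']
      · simp at hc
        simp [List.dropWhile_cons, hc]

lemma renderTailP_congr (rest : List (List Char)) (cur cur' : List Char)
    (h : PySem.Chars.lstrip cur = PySem.Chars.lstrip cur') :
    renderTailP rest cur = renderTailP rest cur' := by
  induction rest with
  | nil => simpa [renderTailP] using h
  | cons s rest ih => simp [renderTailP, ih]

lemma renderTailP_append (rest : List (List Char)) (cur : List Char) (ch : Char)
    (h : cur.all PySem.Chars.isspace = false ∨ PySem.Chars.isspace ch = false) :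
    renderTailP rest (cur ++ [ch]) = renderTailP rest cur ++ [ch] := by
  induction rest with
  | nil => simpa [renderTailP] using lstrip_append cur ch h
  | cons s rest ih => simp [renderTailP, ih]

lemma renderP_append (segs : List (List Char)) (cur : List Char) (ch : Char)
    (h : segs = [] ∨ cur.all PySem.Chars.isspace = false ∨ PySem.Chars.isspace ch = false) :
    renderP segs (cur ++ [ch]) = renderP segs cur ++ [ch] := by
  cases segs with
  | nil => simp [renderP]
  | cons s rest =>
      have h' : cur.all PySem.Chars.isspace = false ∨ PySem.Chars.isspace ch = false := by
        rcases h with h | h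
        · exact absurd h (by simp)
        · exact h
      simp [renderP, renderTailP_append rest cur ch h']

lemma renderP_space (s : List Char) (rest : List (List Char)) (cur : List Char) (ch : Char)
    (hcur : cur.all PySem.Chars.isspace = true) (hch : PySem.Chars.isspace ch = true) :
    renderP (s :: rest) (cur ++ [ch]) = renderP (s :: rest) cur := by
  have h : PySem.Chars.lstrip (cur ++ [ch]) = PySem.Chars.lstrip cur := by
    rw [lstrip_allspace cur hcur, lstrip_allspace (cur ++ [ch]) (by simp [List.all_append, hcur, hch])]
  simp [renderP, renderTailP_congr rest _ _ h]

lemma rstrip_append_nonspace (x y : List Char) (c : Char)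
    (h : PySem.Chars.isspace c = false) :
    PySem.Chars.rstrip (x ++ c :: y) = x ++ c :: PySem.Chars.rstrip y := by
  simp only [PySem.Chars.rstrip]
  rw [show (x ++ c :: y).reverse = y.reverse ++ c :: x.reverse by simp,
      List.dropWhile_append]
  split_ifs with he
  · simp only [List.isEmpty_iff] at he
    rw [he]
    simp [List.dropWhile_cons, h]
  · simp

lemma renderTailP_eq_close (rest : List (List Char)) (cur : List Char) :
    PySem.Chars.rstrip (renderTailP rest cur) ++ ['='] = renderTailP (rest ++ [cur]) [] := by
  induction rest with
  | nil =>
      simp [renderTailP, PySem.Chars.strip, PySem.Chars.lstrip]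
  | cons s rest ih =>
      rw [List.cons_append]
      simp only [renderTailP]
      rw [rstrip_append_nonspace _ _ '=' (by decide)]
      simp [ih]

lemma renderP_close (segs : List (List Char)) (cur : List Char) :
    PySem.Chars.rstrip (renderP segs cur) ++ ['='] = renderP (segs ++ [cur]) [] := by
  cases segs with
  | nil => simp [renderP, renderTailP, PySem.Chars.strip, PySem.Chars.lstrip]
  | cons s rest =>
      rw [List.cons_append]
      simp only [renderP]
      rw [rstrip_append_nonspace _ _ '=' (by decide)]
      simp [renderTailP_eq_close]

lemma main_inv (cs : List Char) : ∀ (segs : List (List Char)) (cur : List Char)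
    (inq : Bool) (qc : Char) (depth : Int),
    normA cs (renderP segs cur) inq qc depth (!segs.isEmpty && cur.all PySem.Chars.isspace)
      = renderSegs (normB cs segs cur inq qc depth) := by
  induction cs with
  | nil => intro segs cur inq qc depth; simp [normA, normB, renderSegs_eq]
  | cons ch cs ih =>
      intro segs cur inq qc depth
      by_cases hskip : ((!segs.isEmpty && cur.all PySem.Chars.isspace) && PySem.Chars.isspace ch) = true
      · -- skipped whitespace: A drops ch, B keeps it in cur; lstrip erases it either way
        have hsegs : segs.isEmpty = false := by
          cases h : segs.isEmpty <;> simp [h] at hskip ⊢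
        have hcur : cur.all PySem.Chars.isspace = true := by
          simp [hsegs] at hskip; simpa [List.all_eq_true] using hskip.1
        have hch : PySem.Chars.isspace ch = true := by simp [hsegs] at hskip; exact hskip.2
        have hst : quoteStep inq qc ch = (inq, qc) := by
          have h1 : ¬ (ch = '"' ∨ ch = '\'') := by
            rintro (rfl | rfl) <;> exact absurd hch (by decide)
          simp [quoteStep, h1]
        have hbr : bracketStep depth ch = depth := by
          have h1 : ¬ (ch = '[' ∨ ch = '(') := by
            rintro (rfl | rfl) <;> exact absurd hch (by decide)
          have h2 : ¬ (ch = ']' ∨ ch = ')') := by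
            rintro (rfl | rfl) <;> exact absurd hch (by decide)
          simp [bracketStep, h1, h2]
        have hne : ¬ (ch = '=' ∧ depth = 0) := by
          rintro ⟨rfl, -⟩; exact absurd hch (by decide)
        rw [show normA (ch :: cs) (renderP segs cur) inq qc depth
              (!segs.isEmpty && cur.all PySem.Chars.isspace)
            = normA cs (renderP segs cur) inq qc depth
              (!segs.isEmpty && cur.all PySem.Chars.isspace) by
          simp [normA, hskip]]
        have hB : normB (ch :: cs) segs cur inq qc depth
            = normB cs segs (cur ++ [ch]) inq qc depth := by
          simp only [normB, hst, hbr]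
          cases inq <;> simp [hne]
        rw [hB]
        have hr : renderP segs cur = renderP segs (cur ++ [ch]) := by
          cases segs with
          | nil => simp at hsegs
          | cons s rest => exact (renderP_space s rest cur ch hcur hch).symm
        have hall : (cur ++ [ch]).all PySem.Chars.isspace = true := by
          simp [List.all_append, hcur, hch]
        rw [hr]
        have := ih segs (cur ++ [ch]) inq qc depth
        rw [hsegs, hall] at this
        rw [hsegs, hcur]
        exact this
      · -- processed character
        have hside : segs = [] ∨ cur.all PySem.Chars.isspace = false ∨ PySem.Chars.isspace ch = false := by
          cases h1 : segs.isEmpty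
          · cases h2 : cur.all PySem.Chars.isspace
            · exact Or.inr (Or.inl rfl)
            · refine Or.inr (Or.inr ?_)
              cases h3 : PySem.Chars.isspace ch
              · rfl
              · exact absurd (by simp [h1, h2, h3]) hskip
          · exact Or.inl (List.isEmpty_iff.mp h1)
        have happ := renderP_append segs cur ch hside
        have hfalse : (!segs.isEmpty && (cur ++ [ch]).all PySem.Chars.isspace) = false := by
          rcases hside with h | h | h
          · simp [h]
          · simp [List.all_append, h]
          · simp [List.all_append, h]
        have hA : normA (ch :: cs) (renderP segs cur) inq qc depth
              (!segs.isEmpty && cur.all PySem.Chars.isspace)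
            = (if !(quoteStep inq qc ch).1 then
                 if ch = '=' ∧ bracketStep depth ch = 0 then
                   normA cs (PySem.Chars.rstrip (renderP segs cur) ++ ['='])
                     (quoteStep inq qc ch).1 (quoteStep inq qc ch).2 (bracketStep depth ch) true
                 else normA cs (renderP segs cur ++ [ch])
                     (quoteStep inq qc ch).1 (quoteStep inq qc ch).2 (bracketStep depth ch) false
               else normA cs (renderP segs cur ++ [ch])
                     (quoteStep inq qc ch).1 (quoteStep inq qc ch).2 depth false) := by
          simp [normA, hskip]
        have hB : normB (ch :: cs) segs cur inq qc depth
            = (if !(quoteStep inq qc ch).1 then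
                 if ch = '=' ∧ bracketStep depth ch = 0 then
                   normB cs (segs ++ [cur]) [] (quoteStep inq qc ch).1 (quoteStep inq qc ch).2 (bracketStep depth ch)
                 else normB cs segs (cur ++ [ch]) (quoteStep inq qc ch).1 (quoteStep inq qc ch).2 (bracketStep depth ch)
               else normB cs segs (cur ++ [ch]) (quoteStep inq qc ch).1 (quoteStep inq qc ch).2 depth) := by
          simp [normB]
        rw [hA, hB]
        split_ifs with hq heq
        · -- top-level '=': close the current segment
          rw [renderP_close segs cur]
          have := ih (segs ++ [cur]) [] (quoteStep inq qc ch).1 (quoteStep inq qc ch).2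
            (bracketStep depth ch)
          rw [show (!(segs ++ [cur]).isEmpty && ([] : List Char).all PySem.Chars.isspace) = true
            by simp] at this
          exact this
        · -- ordinary top-level character: both sides append ch
          rw [← happ]
          have := ih segs (cur ++ [ch]) (quoteStep inq qc ch).1 (quoteStep inq qc ch).2
            (bracketStep depth ch)
          rw [hfalse] at this
          exact this
        · -- inside a quote: both sides append ch, depth unchanged
          rw [← happ]
          have := ih segs (cur ++ [ch]) (quoteStep inq qc ch).1 (quoteStep inq qc ch).2 depth
          rw [hfalse] at this
          exact this

-- ===== VERDICT (by name: the statement is the Claim_ definition above) =====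
theorem normalize_equals_py_spec : Claim_equal_normalize_equals_py := by
  intro text _
  unfold Spec_normalize_equals_py normalize_equals_py normalize_equals_py_alt
  have := main_inv text.toList [] [] false ' ' 0
  simp only [renderP, List.isEmpty_nil, List.all_nil, Bool.not_true, Bool.false_and] at this
  rw [this]
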